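-- pv_equiv track=rewrite | github.com/LangeLab/Analysis_of_QuEStVar_Manuscript | questvar/utils.py | select_representative_protein
-- ===== SOURCE A (Python) =====
-- def select_representative_protein(
--         proteins: str
--     ):
--     """
--     Selects a representative protein from a group.
--
--     The function takes a string of protein IDs separated by semicolons.
--     If there's only one ID, it is returned. If there are multiple IDs,
--     the function prioritizes 6-letter IDs over 10-letter ones. If no 6-letter
--     IDs are present, the first ID is returned.
--
--     Parameters:
--     proteins (str): A string of protein IDs separated by semicolons.
--
--     Returns:
--     str: The ID of the representative protein.
--     """
--     protein_ids = proteins.split(";")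
--
--     if len(protein_ids) == 1:
--         return protein_ids[0]
--
--     six_letter_ids = [id for id in protein_ids if len(id) == 6]
--
--     return six_letter_ids[0] if six_letter_ids else protein_ids[0]
-- ===== SOURCE B (Python) =====
-- def select_representative_protein(proteins: str):
--     # Single keyed selection: min is stable, so this is the first 6-letter ID
--     # if any exists, otherwise the first ID overall.
--     return min(proteins.split(";"), key=lambda pid: 0 if len(pid) == 6 else 1)
-- ===== Notes on version B (the rewrite author's own statement) =====
-- stated objective: simpler
-- what changed: Replaced the special-case len==1 branch plus filter-then-index-0 logic with one stable keyed min over the split list (key 0 for 6-letter IDs, 1 otherwise).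
import Mathlib
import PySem

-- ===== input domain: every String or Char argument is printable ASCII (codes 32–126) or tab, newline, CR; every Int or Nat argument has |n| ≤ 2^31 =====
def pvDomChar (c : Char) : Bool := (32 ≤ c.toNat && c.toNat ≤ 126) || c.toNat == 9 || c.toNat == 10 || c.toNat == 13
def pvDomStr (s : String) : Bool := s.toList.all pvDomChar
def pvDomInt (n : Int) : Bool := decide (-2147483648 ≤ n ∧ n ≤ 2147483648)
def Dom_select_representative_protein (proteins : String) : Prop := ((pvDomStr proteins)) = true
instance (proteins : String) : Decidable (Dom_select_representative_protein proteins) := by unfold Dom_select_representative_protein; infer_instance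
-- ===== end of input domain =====

-- B replaces the len==1 guard and the filter-then-index logic by one stable keyed min; same behaviour, simpler.

-- ===== PORT A =====
def select_representative_protein (proteins : String) : String :=
  let protein_ids := (PySem.Str.split? proteins ";").getD []
  if protein_ids.length == 1 then
    (PySem.List.pyGet? protein_ids 0).getD ""
  else
    let six_letter_ids := protein_ids.filter (fun id => PySem.Str.len id == 6)
    if !six_letter_ids.isEmpty then (PySem.List.pyGet? six_letter_ids 0).getD ""
    else (PySem.List.pyGet? protein_ids 0).getD ""

-- ===== PORT B =====
def select_representative_protein_alt (proteins : String) : String :=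
  (PySem.List.min? ((PySem.Str.split? proteins ";").getD [])
    (fun pid => if PySem.Str.len pid == 6 then (0 : Int) else 1)).getD ""

-- ===== PRECONDITION & SPEC =====
def Spec_select_representative_protein (proteins : String) (out : String) : Prop := out = select_representative_protein_alt proteins
instance (proteins : String) (out : String) : Decidable (Spec_select_representative_protein proteins out) := by unfold Spec_select_representative_protein; infer_instance

-- ===== CLAIM (what is proved, stated in full; the proofs are below) =====
def Claim_equal_select_representative_protein : Prop := ∀ (proteins : String), Dom_select_representative_protein proteins → Spec_select_representative_protein proteins (select_representative_protein proteins)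

-- ===== LEMMAS AND PROOFS =====

-- Proof helpers: the key and the fold step hidden inside PySem.List.min?
def pvKey (pid : String) : Int := if PySem.Str.len pid == 6 then 0 else 1
def pvStep (acc : Option String) (x : String) : Option String :=
  match acc with
  | none => some x
  | some m => if pvKey x < pvKey m then some x else some m

theorem min?_eq_foldStep (xs : List String) :
    PySem.List.min? xs (fun pid => if PySem.Str.len pid == 6 then (0 : Int) else 1)
      = List.foldl pvStep none xs := by
  unfold PySem.List.min?
  congr 1
  funext acc x
  cases acc <;> rfl

-- min? with the 0/1 key, starting from accumulator `some a`, returns the first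
-- element of t with key 0 (length 6); else `a` itself if a has key 0; else `a`.
theorem foldBin (t : List String) (a : String) :
    List.foldl pvStep (some a) t
    = some (if PySem.Str.len a == 6 then a
            else (t.filter (fun x => PySem.Str.len x == 6)).headD a) := by
  induction t generalizing a with
  | nil => simp
  | cons x t ih =>
    rw [List.foldl_cons]
    by_cases ha : (a.length : Int) = 6 <;> by_cases hx : (x.length : Int) = 6
    · have h : pvStep (some a) x = some a := by
        simp [pvStep, pvKey, PySem.Str.len, ha, hx]
      rw [h, ih]; simp [PySem.Str.len, ha]
    · have h : pvStep (some a) x = some a := by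
        simp [pvStep, pvKey, PySem.Str.len, ha, hx]
      rw [h, ih]; simp [PySem.Str.len, ha]
    · have h : pvStep (some a) x = some x := by
        simp [pvStep, pvKey, PySem.Str.len, ha, hx]
      rw [h, ih]; simp [PySem.Str.len, List.filter_cons, ha, hx]
    · have h : pvStep (some a) x = some a := by
        simp [pvStep, pvKey, PySem.Str.len, ha, hx]
      rw [h, ih]; simp [PySem.Str.len, List.filter_cons, ha, hx]

theorem main_lemma (xs : List String) :
    (if xs.length == 1 then (PySem.List.pyGet? xs 0).getD ""
     else
       let six := xs.filter (fun id => PySem.Str.len id == 6)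
       if !six.isEmpty then (PySem.List.pyGet? six 0).getD ""
       else (PySem.List.pyGet? xs 0).getD "")
    = (PySem.List.min? xs (fun pid => if PySem.Str.len pid == 6 then (0 : Int) else 1)).getD "" := by
  rw [min?_eq_foldStep]
  cases xs with
  | nil => simp [PySem.List.pyGet?]
  | cons a t =>
    have h0 : pvStep none a = some a := rfl
    rw [List.foldl_cons, h0, foldBin]
    by_cases ha : (a.length : Int) = 6
    · rcases t with _ | ⟨b, t⟩ <;>
        simp [PySem.Str.len, ha, List.filter_cons, PySem.List.pyGet?, PySem.List.pyIdx?]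
    · rcases t with _ | ⟨b, t⟩
      · simp [PySem.Str.len, ha, PySem.List.pyGet?, PySem.List.pyIdx?]
      · simp only [PySem.Str.len, List.filter_cons]
        cases h : (b :: t).filter (fun x => PySem.Str.len x == 6) with
        | nil =>
          have hb : ¬ ((b.length : Int) = 6) := by
            by_contra hb
            simp [PySem.Str.len, hb, List.filter_cons] at h
          simp_all [PySem.Str.len, List.filter_cons, PySem.List.pyGet?, PySem.List.pyIdx?]
          have hfind : List.find? (fun id : String => (id.length : Int) == 6) t = none := by
            rw [List.find?_eq_none]
            intro x hx
            simpa using h x hx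
          have hpos : (0 : Int) ≤ (t.length : Int) + 1 := by positivity
          simp [hfind, hpos]
        | cons c cs =>
          simp_all [PySem.Str.len, ha, List.filter_cons, PySem.List.pyGet?, PySem.List.pyIdx?]

-- ===== VERDICT (by name: the statement is the Claim_ definition above) =====
theorem select_representative_protein_spec : Claim_equal_select_representative_protein := by
  intro proteins _
  unfold Spec_select_representative_protein select_representative_protein select_representative_protein_alt
  exact main_lemma _
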